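-- pv_equiv track=rewrite | github.com/ms-jpq/nvim_rc | python/nvim/text_object.py | gen_lhs_rhs
-- ===== SOURCE A (Python) =====
-- from typing import MutableSequence, Set, Tuple
--
-- def is_word(c: str, unifying_chars: Set[str]) -> bool:
--     return c.isalnum() or c in unifying_chars
--
-- def gen_lhs_rhs(
--     line: str, col: int, unifying_chars: Set[str]
-- ) -> Tuple[Tuple[str, str], Tuple[str, str]]:
--     before, after = reversed(line[:col]), iter(line[col:])
--
--     words_lhs: MutableSequence[str] = []
--     syms_lhs: MutableSequence[str] = []
--     words_rhs: MutableSequence[str] = []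
--     syms_rhs: MutableSequence[str] = []
--
--     encountered_sym = False
--     for char in before:
--         is_w = is_word(char, unifying_chars=unifying_chars)
--         if encountered_sym:
--             if is_w:
--                 break
--             else:
--                 syms_lhs.append(char)
--         else:
--             if is_w:
--                 words_lhs.append(char)
--             else:
--                 syms_lhs.append(char)
--                 encountered_sym = True
--
--     encountered_sym = False
--     for char in after:
--         is_w = is_word(char, unifying_chars=unifying_chars)
--         if encountered_sym:
--             if is_w:
--                 break
--             else:
--                 syms_rhs.append(char)
--         else:
--             if is_w:
--                 words_rhs.append(char)
--             else:
--                 syms_rhs.append(char)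
--                 encountered_sym = True
--
--     words = "".join(reversed(words_lhs)), "".join(words_rhs)
--     syms = "".join(reversed(syms_lhs)), "".join(syms_rhs)
--     return words, syms
-- ===== SOURCE B (Python) =====
-- def is_word(c, unifying_chars):
--     return c.isalnum() or c in unifying_chars
--
--
-- def gen_lhs_rhs(line, col, unifying_chars):
--     L, R = line[:col], line[col:]
--     i = len(L)
--     while i > 0 and is_word(L[i - 1], unifying_chars):
--         i -= 1
--     j = i
--     while j > 0 and not is_word(L[j - 1], unifying_chars):
--         j -= 1
--     k = 0
--     while k < len(R) and is_word(R[k], unifying_chars):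
--         k += 1
--     m = k
--     while m < len(R) and not is_word(R[m], unifying_chars):
--         m += 1
--     return ((L[i:], R[:k]), (L[j:i], R[k:m]))
-- ===== Notes on version B (the rewrite author's own statement) =====
-- stated objective: simpler
-- what changed: Replaces A's two stateful accumulate-with-flag-and-break loops (building reversed char lists, then joining and re-reversing) by four boundary-index scans on line[:col] and line[col:], returning the four runs as direct slices with no accumulation or reversal.
import Mathlib
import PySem

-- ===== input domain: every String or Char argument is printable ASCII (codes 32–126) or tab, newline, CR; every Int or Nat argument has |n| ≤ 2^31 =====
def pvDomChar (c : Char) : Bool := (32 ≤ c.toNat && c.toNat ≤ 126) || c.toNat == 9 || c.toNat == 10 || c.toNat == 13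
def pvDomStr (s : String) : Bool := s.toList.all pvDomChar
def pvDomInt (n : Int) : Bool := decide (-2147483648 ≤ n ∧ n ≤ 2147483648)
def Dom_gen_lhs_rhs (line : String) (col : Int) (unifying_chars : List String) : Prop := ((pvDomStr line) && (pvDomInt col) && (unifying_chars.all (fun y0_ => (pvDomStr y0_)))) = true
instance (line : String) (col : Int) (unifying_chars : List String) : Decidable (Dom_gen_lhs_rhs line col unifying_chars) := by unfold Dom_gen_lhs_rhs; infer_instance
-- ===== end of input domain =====

-- B computes the four runs by boundary-index scans and slices instead of A's flag/break accumulation loops (objective: simpler).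

-- ===== PORT A =====
-- shared module helper is_word (c.isalnum() or c in unifying_chars); exact on the ASCII domain
def pvIsWord (unifying_chars : List String) (c : Char) : Bool :=
  PySem.Chars.isalnum c || unifying_chars.contains (String.ofList [c])

-- the 'for char in it: …' loop with the encountered_sym flag and break, accumulating words/syms
def pvLoopA (w : Char → Bool) (flag : Bool) (words syms : List Char) : List Char → List Char × List Char
  | [] => (words, syms)
  | c :: rest =>
    if flag then
      if w c then (words, syms) else pvLoopA w flag words (syms ++ [c]) rest
    else
      if w c then pvLoopA w flag (words ++ [c]) syms rest
      else pvLoopA w true words (syms ++ [c]) rest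

def gen_lhs_rhs (line : String) (col : Int) (unifying_chars : List String) : (String × String) × (String × String) :=
  let w := pvIsWord unifying_chars
  let before := (PySem.List.slice line.toList none (some col)).reverse
  let after := PySem.List.slice line.toList (some col) none
  let ls := pvLoopA w false [] [] before
  let rs := pvLoopA w false [] [] after
  ((String.ofList ls.1.reverse, String.ofList rs.1), (String.ofList ls.2.reverse, String.ofList rs.2))

-- ===== PORT B =====
-- 'while i > 0 and p(i-1): i -= 1'
def pvDown (p : Nat → Bool) : Nat → Nat
  | 0 => 0
  | i + 1 => if p i then pvDown p i else i + 1

-- 'while k < n and p(k): k += 1'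
def pvUp (p : Nat → Bool) (n : Nat) (k : Nat) : Nat :=
  if h : k < n then (if p k then pvUp p n (k + 1) else k) else k
termination_by n - k

def gen_lhs_rhs_alt (line : String) (col : Int) (unifying_chars : List String) : (String × String) × (String × String) :=
  let w := pvIsWord unifying_chars
  let L := PySem.List.slice line.toList none (some col)
  let R := PySem.List.slice line.toList (some col) none
  let i := pvDown (fun t => w (L.getD t ' ')) L.length
  let j := pvDown (fun t => !w (L.getD t ' ')) i
  let k := pvUp (fun t => w (R.getD t ' ')) R.length 0
  let m := pvUp (fun t => !w (R.getD t ' ')) R.length k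
  ((String.ofList (L.drop i), String.ofList (R.take k)), (String.ofList ((L.take i).drop j), String.ofList ((R.take m).drop k)))

-- ===== PRECONDITION & SPEC =====
def Spec_gen_lhs_rhs (line : String) (col : Int) (unifying_chars : List String) (out : (String × String) × (String × String)) : Prop := out = gen_lhs_rhs_alt line col unifying_chars
instance (line : String) (col : Int) (unifying_chars : List String) (out : (String × String) × (String × String)) : Decidable (Spec_gen_lhs_rhs line col unifying_chars out) := by unfold Spec_gen_lhs_rhs; infer_instance

-- ===== CLAIM (what is proved, stated in full; the proofs are below) =====
def Claim_equal_gen_lhs_rhs : Prop := ∀ (line : String) (col : Int) (unifying_chars : List String), Dom_gen_lhs_rhs line col unifying_chars → Spec_gen_lhs_rhs line col unifying_chars (gen_lhs_rhs line col unifying_chars)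

-- ===== LEMMAS AND PROOFS =====

theorem pvLoopA_true (w : Char → Bool) (ws ss cs : List Char) :
    pvLoopA w true ws ss cs = (ws, ss ++ cs.takeWhile (fun c => !w c)) := by
  induction cs generalizing ss with
  | nil => simp [pvLoopA]
  | cons c rest ih =>
    by_cases h : w c <;> simp [pvLoopA, h, ih]

theorem pvLoopA_false (w : Char → Bool) (ws ss cs : List Char) :
    pvLoopA w false ws ss cs =
      (ws ++ cs.takeWhile w, ss ++ (cs.dropWhile w).takeWhile (fun c => !w c)) := by
  induction cs generalizing ws with
  | nil => simp [pvLoopA]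
  | cons c rest ih =>
    by_cases h : w c
    · simp [pvLoopA, h, ih]
    · simp [pvLoopA, h, pvLoopA_true]

theorem pvDown_eq (pc : Char → Bool) (L : List Char) :
    ∀ i, i ≤ L.length →
      pvDown (fun t => pc (L.getD t ' ')) i = i - (((L.take i).reverse).takeWhile pc).length := by
  intro i
  induction i with
  | zero => simp [pvDown]
  | succ i ih =>
    intro hi
    have hlt : i < L.length := by omega
    have hrev : (L.take (i + 1)).reverse = L[i] :: (L.take i).reverse := by
      rw [List.take_succ_eq_append_getElem hlt, List.reverse_append]; simp
    by_cases h : pc L[i]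
    · have hp : pc (L.getD i ' ') = true := by
        rw [List.getD_eq_getElem L ' ' hlt]; exact h
      have hlen : (((L.take i).reverse).takeWhile pc).length ≤ i := by
        calc (((L.take i).reverse).takeWhile pc).length ≤ (L.take i).reverse.length :=
              (List.takeWhile_prefix pc).length_le
          _ = (L.take i).length := by simp
          _ ≤ i := by simp
      simp only [pvDown, hp, if_true]
      rw [ih (by omega), hrev, List.takeWhile_cons]
      simp only [h, if_true, List.length_cons]
      omega
    · have hp : pc (L.getD i ' ') = false := by
        rw [List.getD_eq_getElem L ' ' hlt]; simp [h]
      simp only [pvDown, hp]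
      rw [hrev, List.takeWhile_cons]
      simp [h]

theorem pvUp_eq (pc : Char → Bool) (R : List Char) :
    ∀ d k, k + d = R.length →
      pvUp (fun t => pc (R.getD t ' ')) R.length k = k + ((R.drop k).takeWhile pc).length := by
  intro d
  induction d with
  | zero =>
    intro k hk
    have h1 : ¬ k < R.length := by omega
    rw [pvUp]
    simp [h1, List.drop_of_length_le (by omega : R.length ≤ k)]
  | succ d ih =>
    intro k hk
    have hlt : k < R.length := by omega
    have hdrop : R.drop k = R[k] :: R.drop (k + 1) := List.drop_eq_getElem_cons hlt
    by_cases h : pc R[k]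
    · have hp : pc (R.getD k ' ') = true := by
        rw [List.getD_eq_getElem R ' ' hlt]; exact h
      rw [pvUp]
      simp only [hlt, dif_pos, hp, if_true]
      rw [ih (k + 1) (by omega), hdrop, List.takeWhile_cons]
      simp only [h, if_true, List.length_cons]
      omega
    · have hp : pc (R.getD k ' ') = false := by
        rw [List.getD_eq_getElem R ' ' hlt]; simp [h]
      rw [pvUp]
      simp only [hlt, dif_pos, hp]
      rw [hdrop, List.takeWhile_cons]
      simp [h]

-- take/drop at the takeWhile boundary
theorem take_takeWhile_len (p : Char → Bool) (X : List Char) :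
    X.take (X.takeWhile p).length = X.takeWhile p := by
  induction X with
  | nil => simp
  | cons a l ih =>
    rw [List.takeWhile_cons]
    by_cases h : p a <;> simp [h, ih]

theorem drop_takeWhile_len (p : Char → Bool) (X : List Char) :
    X.drop (X.takeWhile p).length = X.dropWhile p := by
  induction X with
  | nil => simp
  | cons a l ih =>
    rw [List.takeWhile_cons, List.dropWhile_cons]
    by_cases h : p a <;> simp [h, ih]

-- suffix forms: drop/take at (length - word-suffix-length)
theorem drop_suffix_len (p : Char → Bool) (X : List Char) :
    X.drop (X.length - (X.reverse.takeWhile p).length) = (X.reverse.takeWhile p).reverse := by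
  set T := X.reverse.takeWhile p with hT
  set D := X.reverse.dropWhile p with hD
  have hx : X = D.reverse ++ T.reverse := by
    rw [hT, hD, ← List.reverse_append, List.takeWhile_append_dropWhile, List.reverse_reverse]
  have hl : T.length + D.length = X.length := by
    rw [hT, hD, ← List.length_append, List.takeWhile_append_dropWhile, List.length_reverse]
  calc X.drop (X.length - T.length)
      = (D.reverse ++ T.reverse).drop ((D.reverse).length) := by
        rw [← hx]
        congr 1
        simp only [List.length_reverse]
        omega
    _ = T.reverse := List.drop_left

theorem take_suffix_len (p : Char → Bool) (X : List Char) :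
    X.take (X.length - (X.reverse.takeWhile p).length) = (X.reverse.dropWhile p).reverse := by
  set T := X.reverse.takeWhile p with hT
  set D := X.reverse.dropWhile p with hD
  have hx : X = D.reverse ++ T.reverse := by
    rw [hT, hD, ← List.reverse_append, List.takeWhile_append_dropWhile, List.reverse_reverse]
  have hl : T.length + D.length = X.length := by
    rw [hT, hD, ← List.length_append, List.takeWhile_append_dropWhile, List.length_reverse]
  calc X.take (X.length - T.length)
      = (D.reverse ++ T.reverse).take ((D.reverse).length) := by
        rw [← hx]
        congr 1
        simp only [List.length_reverse]
        omega
    _ = D.reverse := List.take_left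

-- ===== VERDICT (by name: the statement is the Claim_ definition above) =====
theorem gen_lhs_rhs_spec : Claim_equal_gen_lhs_rhs := by
  intro line col u _
  simp only [Spec_gen_lhs_rhs, gen_lhs_rhs, gen_lhs_rhs_alt]
  set w := pvIsWord u with hw
  set L := PySem.List.slice line.toList none (some col) with hL
  set R := PySem.List.slice line.toList (some col) none with hR
  -- A's loops in closed form
  rw [pvLoopA_false, pvLoopA_false]
  -- B's indices in closed form
  have htW : (L.reverse.takeWhile w).length ≤ L.length := by
    have := (List.takeWhile_prefix (l := L.reverse) w).length_le
    simpa using this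
  have hkW : (R.takeWhile w).length ≤ R.length := (List.takeWhile_prefix w).length_le
  have hi : pvDown (fun t => w (L.getD t ' ')) L.length
      = L.length - ((L.reverse.takeWhile w)).length := by
    rw [pvDown_eq w L L.length le_rfl]; simp
  have hk : pvUp (fun t => w (R.getD t ' ')) R.length 0 = (R.takeWhile w).length := by
    have := pvUp_eq w R R.length 0 (by omega)
    simpa using this
  have hm : pvUp (fun t => !w (R.getD t ' ')) R.length ((R.takeWhile w).length)
      = (R.takeWhile w).length + ((R.dropWhile w).takeWhile (fun c => !w c)).length := by
    have := pvUp_eq (fun c => !w c) R (R.length - (R.takeWhile w).length) (R.takeWhile w).length (by omega)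
    rw [this, drop_takeWhile_len]
  simp only [hi, hk, hm]
  -- lhs pieces
  have hdropL : L.drop (L.length - (L.reverse.takeWhile w).length) = (L.reverse.takeWhile w).reverse :=
    drop_suffix_len w L
  have htakeL : L.take (L.length - (L.reverse.takeWhile w).length) = (L.reverse.dropWhile w).reverse :=
    take_suffix_len w L
  have hlenDW : (L.reverse.takeWhile w).length + (L.reverse.dropWhile w).length = L.length := by
    rw [← List.length_append, List.takeWhile_append_dropWhile, List.length_reverse]
  have hj : pvDown (fun t => !w (L.getD t ' ')) (L.length - (L.reverse.takeWhile w).length)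
      = (L.length - (L.reverse.takeWhile w).length)
        - (((L.reverse.dropWhile w).takeWhile (fun c => !w c))).length := by
    have h1 := pvDown_eq (fun c => !w c) L (L.length - (L.reverse.takeWhile w).length) (by omega)
    rw [h1, htakeL, List.reverse_reverse]
  have hsymL : (L.take (L.length - (L.reverse.takeWhile w).length)).drop
        ((L.length - (L.reverse.takeWhile w).length)
          - (((L.reverse.dropWhile w).takeWhile (fun c => !w c))).length)
      = ((L.reverse.dropWhile w).takeWhile (fun c => !w c)).reverse := by
    rw [htakeL]
    have h2 := drop_suffix_len (fun c => !w c) ((L.reverse.dropWhile w).reverse)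
    rw [List.reverse_reverse, List.length_reverse] at h2
    have h3 : (L.reverse.dropWhile w).length = L.length - (L.reverse.takeWhile w).length := by omega
    rw [h3] at h2
    exact h2
  -- rhs pieces
  have hwordR : R.take ((R.takeWhile w).length) = R.takeWhile w := take_takeWhile_len w R
  have hsymR : (R.take ((R.takeWhile w).length + ((R.dropWhile w).takeWhile (fun c => !w c)).length)).drop
        ((R.takeWhile w).length)
      = (R.dropWhile w).takeWhile (fun c => !w c) := by
    rw [List.drop_take, drop_takeWhile_len]
    have h4 : (R.takeWhile w).length + ((R.dropWhile w).takeWhile (fun c => !w c)).length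
        - (R.takeWhile w).length = ((R.dropWhile w).takeWhile (fun c => !w c)).length := by omega
    rw [h4, take_takeWhile_len]
  rw [hj]
  simp only [hdropL, hsymL, hwordR, hsymR]
  simp
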